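-- pv_equiv track=rewrite | github.com/JZLshen/baseline-simcxl | tools/build_hydrarpc_current_complete_table.py | requests_per_client_profile
-- ===== SOURCE A (Python) =====
-- from collections import Counter
--
-- def requests_per_client_profile(request_rows):
--     counts = Counter()
--     for row in request_rows:
--         counts[row["client_id"]] += 1
--
--     if not counts:
--         return ""
--
--     profile = Counter(counts.values())
--     parts = []
--     for req_count in sorted(profile):
--         parts.append(f"{req_count}x{profile[req_count]}")
--     return ";".join(parts)
-- ===== SOURCE B (Python) =====
-- def requests_per_client_profile(request_rows):
--     counts = {}
--     for row in request_rows: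
--         cid = row["client_id"]
--         counts[cid] = counts.get(cid, 0) + 1
--
--     parts = []
--     cur = None  # pending run of equal totals: (value, run length)
--     for v in sorted(counts.values()):
--         if cur is not None and v == cur[0]:
--             cur = (cur[0], cur[1] + 1)
--         else:
--             if cur is not None:
--                 parts.append(f"{cur[0]}x{cur[1]}")
--             cur = (v, 1)
--     if cur is not None:
--         parts.append(f"{cur[0]}x{cur[1]}")
--     return ";".join(parts)
-- ===== Notes on version B (the rewrite author's own statement) =====
-- stated objective: alternative
-- what changed: The second stage no longer builds a frequency table (Counter of the per-client totals) and iterates its sorted distinct keys; B sorts the raw totals once and emits run lengths of consecutive equal values in a single accumulator pass.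
import Mathlib
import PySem

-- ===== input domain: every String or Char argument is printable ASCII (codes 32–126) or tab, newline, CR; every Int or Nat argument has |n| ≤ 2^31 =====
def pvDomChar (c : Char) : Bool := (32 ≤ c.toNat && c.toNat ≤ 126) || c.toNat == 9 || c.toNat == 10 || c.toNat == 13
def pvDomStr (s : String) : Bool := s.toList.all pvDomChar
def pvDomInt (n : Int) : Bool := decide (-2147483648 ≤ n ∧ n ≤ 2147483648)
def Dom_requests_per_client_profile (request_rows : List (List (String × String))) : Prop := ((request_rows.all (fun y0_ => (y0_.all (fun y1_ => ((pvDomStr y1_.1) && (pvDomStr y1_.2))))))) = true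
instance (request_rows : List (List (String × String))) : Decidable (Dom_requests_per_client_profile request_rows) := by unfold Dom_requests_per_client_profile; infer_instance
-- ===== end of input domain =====

-- B replaces A's second Counter (frequency table over per-client totals) by one sort of the
-- raw totals followed by a run-length pass; same output, no speed claim (objective: alternative).

-- row["client_id"]  (Pre_ guarantees the key is present; the .getD "" default is never reached there)
def pvCid (row : List (String × String)) : String :=
  ((PySem.Dict.mk row).get? "client_id").getD ""

-- f"{k}x{n}"
def pvFmt (k n : Int) : String := PySem.Int.toStr k ++ "x" ++ PySem.Int.toStr n

-- ===== PORT A =====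
def requests_per_client_profile (request_rows : List (List (String × String))) : String :=
  let counts : PySem.Dict String Int :=
    request_rows.foldl (fun d row => d.modify (pvCid row) 0 (· + 1)) PySem.Dict.empty
  if counts.size = 0 then ""
  else
    let profile : PySem.Dict Int Int := PySem.Dict.counter counts.values
    let parts := (PySem.List.sorted profile.keys (fun x => x) false).foldl
        (fun ps k => ps ++ [pvFmt k (profile.getD k 0)]) ([] : List String)
    PySem.Str.join ";" parts

-- ===== PORT B =====
-- one step of B's run-length loop over the sorted totals; state = (pending run, emitted parts)
def pvRunStep (st : Option (Int × Int) × List String) (v : Int) : Option (Int × Int) × List String :=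
  match st with
  | (some (c, r), parts) =>
      if v = c then (some (c, r + 1), parts)
      else (some (v, 1), parts ++ [pvFmt c r])
  | (none, parts) => (some (v, 1), parts)

-- B's trailing "if cur is not None: parts.append(...)"
def pvRunOut (st : Option (Int × Int) × List String) : List String :=
  match st with
  | (some (c, r), parts) => parts ++ [pvFmt c r]
  | (none, parts) => parts

def requests_per_client_profile_alt (request_rows : List (List (String × String))) : String :=
  let counts : PySem.Dict String Int :=
    request_rows.foldl (fun d row =>
      let cid := pvCid row
      d.insert cid (d.getD cid 0 + 1)) PySem.Dict.empty
  PySem.Str.join ";"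
    (pvRunOut ((PySem.List.sorted counts.values (fun x => x) false).foldl pvRunStep (none, [])))

-- ===== PRECONDITION & SPEC =====
-- Pre_ excludes exactly the rows lacking a "client_id" key, on which Python A raises KeyError.
def Pre_requests_per_client_profile (request_rows : List (List (String × String))) : Prop :=
  ∀ row ∈ request_rows, "client_id" ∈ row.map Prod.fst
instance (request_rows : List (List (String × String))) : Decidable (Pre_requests_per_client_profile request_rows) := by unfold Pre_requests_per_client_profile; infer_instance

def pvWitness_requests_per_client_profile : (List (List (String × String))) :=
  [[("client_id", "a")], [("client_id", "b"), ("op", "r")], [("client_id", "a")]]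

def Spec_requests_per_client_profile (request_rows : List (List (String × String))) (out : String) : Prop := out = requests_per_client_profile_alt request_rows
instance (request_rows : List (List (String × String))) (out : String) : Decidable (Spec_requests_per_client_profile request_rows out) := by unfold Spec_requests_per_client_profile; infer_instance

-- ===== CLAIM (what is proved, stated in full; the proofs are below) =====
def Claim_equal_requests_per_client_profile : Prop := ∀ (request_rows : List (List (String × String))), Dom_requests_per_client_profile request_rows → Pre_requests_per_client_profile request_rows → Spec_requests_per_client_profile request_rows (requests_per_client_profile request_rows)

-- ===== LEMMAS AND PROOFS =====

-- first-occurrence dedup of a list (for a sorted list: the run values in order)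
def pvU : List Int → List Int
  | [] => []
  | v :: t => v :: (pvU t).filter (fun x => x ≠ v)

theorem mem_pvU (l : List Int) (x : Int) : x ∈ pvU l ↔ x ∈ l := by
  induction l with
  | nil => simp [pvU]
  | cons v t ih =>
    simp only [pvU, List.mem_cons, List.mem_filter, ih, decide_eq_true_eq]
    by_cases hx : x = v <;> simp [hx]

theorem nodup_pvU (l : List Int) : (pvU l).Nodup := by
  induction l with
  | nil => simp [pvU]
  | cons v t ih =>
    rw [pvU]
    refine List.nodup_cons.mpr ⟨?_, ih.filter _⟩
    intro hv
    have := (List.mem_filter.mp hv).2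
    simp at this

theorem pairwise_lt_pvU (l : List Int) (h : l.Pairwise (· ≤ ·)) : (pvU l).Pairwise (· < ·) := by
  induction l with
  | nil => simp [pvU]
  | cons v t ih =>
    rw [pvU]
    rcases List.pairwise_cons.mp h with ⟨hv, ht⟩
    refine List.pairwise_cons.mpr ⟨?_, (ih ht).sublist List.filter_sublist⟩
    intro b hb
    have hbm : b ∈ t := (mem_pvU t b).mp (List.mem_of_mem_filter hb)
    have hne : b ≠ v := by simpa using List.of_mem_filter hb
    exact lt_of_le_of_ne (hv b hbm) (Ne.symm hne)

theorem run_some (s : List Int) (hs : s.Pairwise (· ≤ ·)) (c r : Int) (parts : List String)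
    (hle : ∀ x ∈ s, c ≤ x) :
    pvRunOut (s.foldl pvRunStep (some (c, r), parts)) =
      parts ++ [pvFmt c (r + s.count c)] ++
        ((pvU s).filter (fun x => x ≠ c)).map (fun k => pvFmt k (s.count k)) := by
  induction s generalizing c r parts with
  | nil => simp [pvRunOut, pvU]
  | cons v t ih =>
    rcases List.pairwise_cons.mp hs with ⟨hv, ht⟩
    by_cases hvc : v = c
    · subst hvc
      rw [List.foldl_cons]
      have hstep : pvRunStep (some (v, r), parts) v = (some (v, r + 1), parts) := by
        simp [pvRunStep]
      rw [hstep, ih ht v (r + 1) parts hv]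
      congr 1
      · congr 2
        have : (v :: t).count v = t.count v + 1 := by simp
        rw [this]; push_cast; ring
      · rw [pvU, List.filter_cons_of_neg (by simp), List.filter_filter]
        have hfil : ((pvU t).filter (fun x => decide (x ≠ v) && decide (x ≠ v))) = (pvU t).filter (fun x => x ≠ v) := by
          apply List.filter_congr; intro x _; simp
        rw [hfil]
        apply List.map_congr_left
        intro k hk
        have hkne : k ≠ v := by simpa using (List.of_mem_filter hk)
        have : (v :: t).count k = t.count k := by
          rw [List.count_cons]; simp [Ne.symm hkne]
        rw [this]
    · -- v ≠ c : close the pending run for c; c occurs nowhere in v :: t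
      have hcv : c < v := lt_of_le_of_ne (hle v (by simp)) (fun h => hvc h.symm)
      have hclt : ∀ x ∈ v :: t, c < x := by
        intro x hx
        rcases List.mem_cons.mp hx with h | h
        · exact h ▸ hcv
        · exact lt_of_lt_of_le hcv (hv x h)
      have hcount0 : (v :: t).count c = 0 := by
        rw [List.count_eq_zero]
        intro hc
        exact absurd rfl (ne_of_gt (hclt c hc))
      rw [List.foldl_cons]
      have hstep : pvRunStep (some (c, r), parts) v = (some (v, 1), parts ++ [pvFmt c r]) := by
        simp [pvRunStep, hvc]
      rw [hstep, ih ht v 1 (parts ++ [pvFmt c r]) hv]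
      rw [hcount0, pvU]
      have hkeep : ((v :: (pvU t).filter (fun x => x ≠ v)).filter (fun x => x ≠ c)) = v :: (pvU t).filter (fun x => x ≠ v) := by
        apply List.filter_eq_self.mpr
        intro x hx
        have hxm : x ∈ v :: t := by
          rcases List.mem_cons.mp hx with h | h
          · exact h ▸ List.mem_cons_self
          · exact List.mem_cons_of_mem _ ((mem_pvU t x).mp (List.mem_of_mem_filter h))
        simp [ne_of_gt (hclt x hxm)]
      rw [hkeep]
      simp only [List.map_cons, List.append_assoc, List.cons_append, List.nil_append]
      congr 2
      · congr 1
        · push_cast; ring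
      · congr 1
        · congr 1
          have : (v :: t).count v = t.count v + 1 := by simp
          rw [this]; push_cast; ring
        · apply List.map_congr_left
          intro k hk
          have hkne : k ≠ v := by simpa using (List.of_mem_filter hk)
          have : (v :: t).count k = t.count k := by
            rw [List.count_cons]; simp [Ne.symm hkne]
          rw [this]

theorem run_none (s : List Int) (hs : s.Pairwise (· ≤ ·)) (parts : List String) :
    pvRunOut (s.foldl pvRunStep (none, parts)) =
      parts ++ (pvU s).map (fun k => pvFmt k (s.count k)) := by
  cases s with
  | nil => simp [pvRunOut, pvU]
  | cons v t =>
    rcases List.pairwise_cons.mp hs with ⟨hv, ht⟩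
    rw [List.foldl_cons]
    have hstep : pvRunStep (none, parts) v = (some (v, 1), parts) := by
      simp [pvRunStep]
    rw [hstep, run_some t ht v 1 parts hv, pvU]
    simp only [List.map_cons, List.append_assoc, List.singleton_append]
    congr 2
    · congr 1
      have : (v :: t).count v = t.count v + 1 := by simp
      rw [this]; push_cast; ring
    · apply List.map_congr_left
      intro k hk
      have hkne : k ≠ v := by simpa using (List.of_mem_filter hk)
      have : (v :: t).count k = t.count k := by
        rw [List.count_cons]; simp [Ne.symm hkne]
      rw [this]

theorem counts_eq (request_rows : List (List (String × String))) :
    request_rows.foldl (fun d row => d.modify (pvCid row) 0 (· + 1)) PySem.Dict.empty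
      = PySem.Dict.counter (request_rows.map pvCid) := by
  rw [PySem.Dict.counter_eq_foldl, List.foldl_map]

theorem counts_alt_eq (request_rows : List (List (String × String))) :
    request_rows.foldl (fun d row =>
      let cid := pvCid row
      d.insert cid (d.getD cid 0 + 1)) PySem.Dict.empty
      = PySem.Dict.counter (request_rows.map pvCid) := by
  rw [← PySem.Dict.foldl_insert_getD_add_one_eq_counter, List.foldl_map]

theorem pvU_sorted_eq (vals : List Int) :
    PySem.List.sorted (PySem.Set.ofList vals) (fun x => x) false
      = pvU (PySem.List.sorted vals (fun x => x) false) := by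
  apply PySem.List.sorted_eq_of_perm_of_pairwise_lt
  · rw [List.perm_ext_iff_of_nodup (nodup_pvU _) (PySem.Set.nodup_ofList _)]
    intro a
    rw [mem_pvU, PySem.List.mem_sorted, PySem.Set.mem_ofList]
  · exact pairwise_lt_pvU _ (PySem.List.sorted_pairwise vals (fun x => x))

-- ===== VERDICT (by name: the statement is the Claim_ definition above) =====
theorem requests_per_client_profile_spec : Claim_equal_requests_per_client_profile := by
  intro rows _ _
  unfold Spec_requests_per_client_profile
  unfold requests_per_client_profile requests_per_client_profile_alt
  simp only [counts_eq, counts_alt_eq]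
  cases rows with
  | nil => decide
  | cons h t =>
    set cids := ((h :: t).map pvCid) with hcids
    set vals := (PySem.Dict.counter cids).values with hvals
    have hsz : (PySem.Dict.counter cids).size ≠ 0 := by
      intro h0
      have hmem : pvCid h ∈ PySem.Set.ofList cids := by
        rw [PySem.Set.mem_ofList]; simp [hcids]
      simp only [PySem.Dict.size, PySem.Dict.items_counter, List.length_map] at h0
      rw [List.length_eq_zero_iff] at h0
      simp [h0] at hmem
    rw [if_neg hsz]
    set s := PySem.List.sorted vals (fun x => x) false with hseq
    have hB : pvRunOut (s.foldl pvRunStep (none, [])) =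
        (pvU s).map (fun k => pvFmt k (s.count k)) := by
      simpa using run_none s (by simpa using PySem.List.sorted_pairwise vals (fun x => x)) []
    rw [hB]
    have hA : (PySem.List.sorted (PySem.Dict.counter vals).keys (fun x => x) false).foldl
        (fun ps k => ps ++ [pvFmt k ((PySem.Dict.counter vals).getD k 0)]) ([] : List String)
        = (pvU s).map (fun k => pvFmt k (s.count k)) := by
      rw [PySem.List.foldl_append_singleton_eq_map, PySem.Dict.keys_counter, pvU_sorted_eq]
      apply List.map_congr_left
      intro k _
      rw [PySem.Dict.getD_counter]
      congr 1
      exact_mod_cast ((PySem.List.sorted_perm vals (fun x => x) false).count_eq k).symm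
    rw [hA]
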